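-- pv_equiv track=rewrite | github.com/sgao26/pract-coding | python/incrementing-rows-columns.py | final
-- ===== SOURCE A (Python) =====
-- def final(r, c, i):
-- 	result = []
-- 	row = []
-- 	for _ in range(r):
-- 		row = [0] * c
-- 		result.append(row)
-- 	if i == []:
-- 		return result
-- 	for operation in i:
-- 		num = 0
-- 		roworcolumn = ''
-- 		for char in operation:
-- 			if char.isdigit():
-- 				num = int(char)
-- 			else:
-- 				roworcolumn = char
-- 		if roworcolumn == 'r':
-- 			for each in range(len(result[num])):
-- 				result[num][each] += 1
-- 		elif roworcolumn == 'c':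
-- 			for each in range(len(result)):
-- 				result[each][num] += 1
-- 	return result
-- ===== SOURCE B (Python) =====
-- def final(r, c, i):
-- 	rowcnt = {}
-- 	colcnt = {}
-- 	for operation in i:
-- 		num = 0
-- 		roworcolumn = ''
-- 		for char in operation:
-- 			if char.isdigit():
-- 				num = int(char)
-- 			else:
-- 				roworcolumn = char
-- 		if roworcolumn == 'r':
-- 			rowcnt[num] = rowcnt.get(num, 0) + 1
-- 		elif roworcolumn == 'c':
-- 			colcnt[num] = colcnt.get(num, 0) + 1
-- 	if r <= 0:
-- 		return []
-- 	base = [colcnt.get(y, 0) for y in range(c)]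
-- 	result = []
-- 	for x in range(r):
-- 		v = rowcnt.get(x, 0)
-- 		result.append([v + b for b in base] if v else base[:])
-- 	return result
-- ===== Notes on version B (the rewrite author's own statement) =====
-- stated objective: alternative
-- what changed: Instead of materialising the grid and walking a whole row or column for every operation, B tallies increments per row index and per column index in two dicts, builds one base row from the column counts, and emits each row as base (copied) or base shifted by its row count.
import Mathlib
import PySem

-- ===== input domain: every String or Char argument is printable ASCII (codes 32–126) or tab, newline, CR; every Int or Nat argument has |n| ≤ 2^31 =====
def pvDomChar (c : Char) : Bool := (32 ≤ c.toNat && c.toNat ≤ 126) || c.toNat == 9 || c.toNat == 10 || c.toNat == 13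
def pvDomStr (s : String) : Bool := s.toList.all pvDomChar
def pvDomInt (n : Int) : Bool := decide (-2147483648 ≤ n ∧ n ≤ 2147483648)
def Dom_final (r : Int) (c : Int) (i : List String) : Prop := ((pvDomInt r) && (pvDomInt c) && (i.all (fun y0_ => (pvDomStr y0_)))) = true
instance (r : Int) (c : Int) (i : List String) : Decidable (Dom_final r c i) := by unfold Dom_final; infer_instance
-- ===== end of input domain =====

-- B replaces A's per-operation row/column walks by two count dicts, a base row from the column counts, and a single fill pass.
-- Pre_final excludes exactly the inputs where A raises IndexError (an operation targeting a row/column index outside the grid).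


-- Shared helper: the inner character loop both Pythons contain verbatim
-- (num = value of the last digit character, roworcolumn = the last non-digit character).
-- int(char) on a single ASCII digit char is exactly char code - 48 (Dom restricts to ASCII).
def opParse (op : String) : Int × String :=
  op.toList.foldl
    (fun (s : Int × String) ch =>
      if PySem.Chars.isdigit ch then (((ch.toNat : Int) - 48), s.2)
      else (s.1, String.ofList [ch]))
    ((0 : Int), "")

-- ===== PORT A =====
def finalStepA (result : List (List Int)) (op : String) : List (List Int) :=
  if (opParse op).2 = "r" then
    -- for each in range(len(result[num])): result[num][each] += 1
    result.modify (opParse op).1.toNat (fun row => row.map (· + 1))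
  else if (opParse op).2 = "c" then
    -- for each in range(len(result)): result[each][num] += 1
    result.map (fun row => row.modify (opParse op).1.toNat (· + 1))
  else result

def final (r : Int) (c : Int) (i : List String) : List (List Int) :=
  let result : List (List Int) :=
    (PySem.List.pyRange 0 r 1).foldl (fun res _ => res ++ [List.replicate c.toNat (0 : Int)]) []
  if i = [] then result
  else i.foldl finalStepA result

-- ===== PORT B =====
def finalStepB (d : PySem.Dict Int Int × PySem.Dict Int Int) (op : String) :
    PySem.Dict Int Int × PySem.Dict Int Int :=
  if (opParse op).2 = "r" then (d.1.insert (opParse op).1 (d.1.getD (opParse op).1 0 + 1), d.2)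
  else if (opParse op).2 = "c" then (d.1, d.2.insert (opParse op).1 (d.2.getD (opParse op).1 0 + 1))
  else d

def final_alt (r : Int) (c : Int) (i : List String) : List (List Int) :=
  let cnts := i.foldl finalStepB (PySem.Dict.empty, PySem.Dict.empty)
  if r ≤ 0 then [] else
  let base := (PySem.List.pyRange 0 c 1).map (fun y => cnts.2.getD y 0)
  -- the row loop: at most the single-digit rows differ from base (base[:] is a copy in Python;
  -- only the value matters here, so it is ported as base itself)
  (PySem.List.pyRange 0 r 1).foldl (fun result x =>
    result ++ [if cnts.1.getD x 0 ≠ 0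
               then base.map (fun b => cnts.1.getD x 0 + b) else base]) []

-- ===== PRECONDITION & SPEC =====
-- Pre_final excludes exactly the inputs on which A raises IndexError: an operation whose
-- parsed kind is 'r' with row index ≥ r, or kind 'c' with column index ≥ c while the grid has rows.
def Pre_final (r : Int) (c : Int) (i : List String) : Prop :=
  ∀ op ∈ i, ((opParse op).2 = "r" → (opParse op).1 < r) ∧
            ((opParse op).2 = "c" → 0 < r → (opParse op).1 < c)
instance (r : Int) (c : Int) (i : List String) : Decidable (Pre_final r c i) := by
  unfold Pre_final; infer_instance
def pvWitness_final : Int × Int × List String := (2, 3, ["r0", "2c", "x", ""])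
def Spec_final (r : Int) (c : Int) (i : List String) (out : List (List Int)) : Prop := out = final_alt r c i
instance (r : Int) (c : Int) (i : List String) (out : List (List Int)) : Decidable (Spec_final r c i out) := by unfold Spec_final; infer_instance

-- ===== CLAIM (what is proved, stated in full; the proofs are below) =====
def Claim_equal_final : Prop := ∀ (r : Int) (c : Int) (i : List String), Dom_final r c i → Pre_final r c i → Spec_final r c i (final r c i)


-- ===== LEMMAS AND PROOFS =====

-- the character-loop accumulator's numeric component is always a digit value (hence ≥ 0)
theorem opParse_go_nonneg (cs : List Char) (s : Int × String) (hs : 0 ≤ s.1) :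
    0 ≤ (cs.foldl (fun (s : Int × String) ch =>
      if PySem.Chars.isdigit ch then (((ch.toNat : Int) - 48), s.2)
      else (s.1, String.ofList [ch])) s).1 := by
  induction cs generalizing s with
  | nil => simpa using hs
  | cons ch cs ih =>
    simp only [List.foldl_cons]
    by_cases hd : PySem.Chars.isdigit ch = true
    · apply ih
      have h0 : '0' ≤ ch := by
        simp only [PySem.Chars.isdigit, Bool.and_eq_true, decide_eq_true_eq] at hd
        exact hd.1
      have h48 : ('0' : Char).toNat ≤ ch.toNat := UInt32.le_iff_toNat_le.mp (Char.le_def.mp h0)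
      have h48' : ('0' : Char).toNat = 48 := rfl
      simp only [hd, if_true]
      show 0 ≤ (ch.toNat : Int) - 48
      omega
    · apply ih
      simpa [hd] using hs

theorem opParse_nonneg (op : String) : 0 ≤ (opParse op).1 :=
  opParse_go_nonneg op.toList (0, "") (by norm_num)

-- the row-building loop yields replicate
theorem buildRows (l : List Int) (acc : List (List Int)) (row : List Int) :
    l.foldl (fun res _ => res ++ [row]) acc = acc ++ List.replicate l.length row := by
  induction l generalizing acc with
  | nil => simp
  | cons a l ih => simp [ih, List.replicate_succ]

-- counting characterisation of B's dict fold
theorem dictFold_getD (i : List String) (d1 d2 : PySem.Dict Int Int) (x : Int) :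
    (i.foldl finalStepB (d1, d2)).1.getD x 0
      = d1.getD x 0 + (i.countP (fun op => (opParse op).2 = "r" ∧ (opParse op).1 = x) : Int) ∧
    (i.foldl finalStepB (d1, d2)).2.getD x 0
      = d2.getD x 0 + (i.countP (fun op => (opParse op).2 = "c" ∧ (opParse op).1 = x) : Int) := by
  induction i generalizing d1 d2 with
  | nil => simp
  | cons op ops ih =>
    simp only [List.foldl_cons, List.countP_cons]
    by_cases hr : (opParse op).2 = "r"
    · have hnc : ¬ ((opParse op).2 = "c" ∧ (opParse op).1 = x) := by
        rintro ⟨hc, -⟩; rw [hr] at hc; exact absurd hc (by decide)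
      have hstep : finalStepB (d1, d2) op
          = (d1.insert (opParse op).1 (d1.getD (opParse op).1 0 + 1), d2) := by
        simp [finalStepB, hr]
      rw [hstep]
      rcases ih (d1.insert (opParse op).1 (d1.getD (opParse op).1 0 + 1)) d2 with ⟨h1, h2⟩
      refine ⟨?_, ?_⟩
      · rw [h1, PySem.Dict.getD_insert]
        by_cases hx : x = (opParse op).1
        · simp [hx, hr]; ring
        · have hne : ¬ ((opParse op).2 = "r" ∧ (opParse op).1 = x) := by
            rintro ⟨-, h⟩; exact hx h.symm
          simp [hx, hne]
      · rw [h2]; simp [hnc]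
    · by_cases hc : (opParse op).2 = "c"
      · have hnr : ¬ ((opParse op).2 = "r" ∧ (opParse op).1 = x) := by
          rintro ⟨h, -⟩; exact hr h
        have hstep : finalStepB (d1, d2) op
            = (d1, d2.insert (opParse op).1 (d2.getD (opParse op).1 0 + 1)) := by
          simp [finalStepB, hc]
        rw [hstep]
        rcases ih d1 (d2.insert (opParse op).1 (d2.getD (opParse op).1 0 + 1)) with ⟨h1, h2⟩
        refine ⟨?_, ?_⟩
        · rw [h1]; simp [hnr]
        · rw [h2, PySem.Dict.getD_insert]
          by_cases hx : x = (opParse op).1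
          · simp [hx, hc]; ring
          · have hne : ¬ ((opParse op).2 = "c" ∧ (opParse op).1 = x) := by
              rintro ⟨-, h⟩; exact hx h.symm
            simp [hx, hne]
      · have hnr : ¬ ((opParse op).2 = "r" ∧ (opParse op).1 = x) := by
          rintro ⟨h, -⟩; exact hr h
        have hnc : ¬ ((opParse op).2 = "c" ∧ (opParse op).1 = x) := by
          rintro ⟨h, -⟩; exact hc h
        have hstep : finalStepB (d1, d2) op = (d1, d2) := by
          simp [finalStepB, hr, hc]
        rw [hstep]
        rcases ih d1 d2 with ⟨h1, h2⟩
        exact ⟨by rw [h1]; simp [hnr], by rw [h2]; simp [hnc]⟩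

-- A's step preserves the grid shape
theorem stepA_length (g : List (List Int)) (op : String) :
    (finalStepA g op).length = g.length := by
  unfold finalStepA
  split_ifs <;> simp [List.length_modify]

theorem stepA_row_length (g : List (List Int)) (op : String) (x : Nat) (hx : x < g.length) :
    ((finalStepA g op).getD x []).length = (g.getD x []).length := by
  unfold finalStepA
  have hx' : x < (g.modify (opParse op).1.toNat (fun row => row.map (· + 1))).length := by
    simpa [List.length_modify] using hx
  split_ifs
  · rw [List.getD_eq_getElem _ _ hx', List.getD_eq_getElem _ _ hx]
    rw [List.getElem_modify]
    split <;> simp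
  · rw [List.getD_eq_getElem _ _ (by simpa using hx), List.getD_eq_getElem _ _ hx]
    simp [List.length_modify]
  · rfl

-- A's step's effect on one entry, on valid in-range operations
theorem stepA_entry (g : List (List Int)) (op : String)
    (hvr : (opParse op).2 = "r" → (opParse op).1.toNat < g.length)
    (hvc : (opParse op).2 = "c" → ∀ x < g.length, (opParse op).1.toNat < (g.getD x []).length)
    (x y : Nat) (hx : x < g.length) (hy : y < (g.getD x []).length) :
    ((finalStepA g op).getD x []).getD y 0
      = (g.getD x []).getD y 0
        + (if (opParse op).2 = "r" ∧ (opParse op).1.toNat = x then 1 else 0)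
        + (if (opParse op).2 = "c" ∧ (opParse op).1.toNat = y then 1 else 0) := by
  have hy' : y < g[x].length := by rw [List.getD_eq_getElem _ _ hx] at hy; exact hy
  unfold finalStepA
  by_cases hr : (opParse op).2 = "r"
  · have hcr : ¬ ((opParse op).2 = "c" ∧ (opParse op).1.toNat = y) := by
      rintro ⟨h, -⟩; rw [hr] at h; exact absurd h (by decide)
    rw [if_pos hr, if_neg hcr]
    have hind : (if (opParse op).2 = "r" ∧ (opParse op).1.toNat = x then (1 : Int) else 0)
        = (if (opParse op).1.toNat = x then (1 : Int) else 0) := by simp [hr]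
    rw [hind]
    have hx' : x < (g.modify (opParse op).1.toNat (fun row => row.map (· + 1))).length := by
      simpa [List.length_modify] using hx
    rw [List.getD_eq_getElem _ _ hx', List.getElem_modify]
    by_cases he : (opParse op).1.toNat = x
    · rw [if_pos he,
        List.getD_eq_getElem _ _ (show y < (List.map (fun v => v + 1) g[x]).length by simpa using hy'),
        List.getElem_map, List.getD_eq_getElem _ _ hx, List.getD_eq_getElem _ _ hy']
      simp [he]
    · rw [if_neg he, List.getD_eq_getElem _ _ hx]
      simp [he]
  · by_cases hc : (opParse op).2 = "c"
    · have hrr : ¬ ((opParse op).2 = "r" ∧ (opParse op).1.toNat = x) := fun h2 => hr h2.1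
      rw [if_neg hr, if_pos hc, if_neg hrr, add_zero]
      have hind : (if (opParse op).2 = "c" ∧ (opParse op).1.toNat = y then (1 : Int) else 0)
          = (if (opParse op).1.toNat = y then (1 : Int) else 0) := by simp [hc]
      rw [hind]
      rw [List.getD_eq_getElem _ _
          (show x < (List.map (fun row => row.modify (opParse op).1.toNat (· + 1)) g).length by
            simpa using hx),
        List.getElem_map,
        List.getD_eq_getElem _ _
          (show y < (g[x].modify (opParse op).1.toNat (· + 1)).length by
            simpa [List.length_modify] using hy'),
        List.getElem_modify, List.getD_eq_getElem _ _ hx, List.getD_eq_getElem _ _ hy']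
      by_cases he : (opParse op).1.toNat = y
      · simp [he]
      · simp [he]
    · simp [hr, hc]

-- the operations fold: shape preserved, each entry gains the row count plus the column count
theorem gridFold (ops : List String) (g : List (List Int))
    (hv : ∀ op ∈ ops, ((opParse op).2 = "r" → (opParse op).1.toNat < g.length) ∧
          ((opParse op).2 = "c" → ∀ x < g.length, (opParse op).1.toNat < (g.getD x []).length)) :
    (ops.foldl finalStepA g).length = g.length ∧
    (∀ x, x < g.length → ((ops.foldl finalStepA g).getD x []).length = (g.getD x []).length) ∧
    (∀ x y, x < g.length → (hy : y < (g.getD x []).length) →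
      ((ops.foldl finalStepA g).getD x []).getD y 0
        = (g.getD x []).getD y 0
          + (ops.countP (fun op => (opParse op).2 = "r" ∧ (opParse op).1.toNat = x) : Int)
          + (ops.countP (fun op => (opParse op).2 = "c" ∧ (opParse op).1.toNat = y) : Int)) := by
  induction ops generalizing g with
  | nil => simp
  | cons op ops ih =>
    have hop := hv op (by simp)
    have hv' : ∀ o ∈ ops, ((opParse o).2 = "r" → (opParse o).1.toNat < (finalStepA g op).length) ∧
        ((opParse o).2 = "c" → ∀ x < (finalStepA g op).length,
          (opParse o).1.toNat < ((finalStepA g op).getD x []).length) := by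
      intro o ho
      have h := hv o (by simp [ho])
      refine ⟨fun h2 => ?_, fun h2 x hx => ?_⟩
      · rw [stepA_length]; exact h.1 h2
      · rw [stepA_length] at hx
        rw [stepA_row_length g op x hx]
        exact h.2 h2 x hx
    rcases ih (finalStepA g op) hv' with ⟨hl, hrl, hent⟩
    simp only [List.foldl_cons]
    refine ⟨by rw [hl, stepA_length], fun x hx => ?_, fun x y hx hy => ?_⟩
    · rw [hrl x (by rw [stepA_length]; exact hx), stepA_row_length g op x hx]
    · have hx' : x < (finalStepA g op).length := by rw [stepA_length]; exact hx
      have hy' : y < ((finalStepA g op).getD x []).length := by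
        rw [stepA_row_length g op x hx]; exact hy
      rw [hent x y hx' hy']
      rw [stepA_entry g op hop.1 hop.2 x y hx hy]
      simp only [List.countP_cons, decide_eq_true_eq]
      push_cast
      split_ifs <;> ring

theorem stepA_nil (op : String) : finalStepA [] op = [] := by
  unfold finalStepA; split_ifs <;> simp

theorem foldA_nil (ops : List String) : ops.foldl finalStepA [] = [] := by
  induction ops with
  | nil => rfl
  | cons o os ih => rw [List.foldl_cons, stepA_nil]; exact ih

theorem altRow_length (v : Int) (base : List Int) :
    (if v ≠ 0 then base.map (fun b => v + b) else base).length = base.length := by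
  split <;> simp

theorem altRow_getD (v : Int) (base : List Int) (y : Nat) (hy : y < base.length) :
    (if v ≠ 0 then base.map (fun b => v + b) else base).getD y 0 = v + base.getD y 0 := by
  by_cases h : v = 0
  · simp [h]
  · rw [if_pos h, List.getD_eq_getElem _ _ (by simpa using hy), List.getElem_map,
      List.getD_eq_getElem _ _ hy]

-- casting the count predicates between Int-valued and Nat-valued index comparisons
theorem countP_toNat_eq (ops : List String) (k : String) (x : Nat) :
    (ops.countP (fun op => (opParse op).2 = k ∧ (opParse op).1.toNat = x))
      = ops.countP (fun op => (opParse op).2 = k ∧ (opParse op).1 = (x : Int)) := by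
  apply List.countP_congr
  intro op _
  have h0 := opParse_nonneg op
  by_cases h1 : (opParse op).2 = k
  · have h2 : ((opParse op).1.toNat = x) ↔ ((opParse op).1 = (x : Int)) := by omega
    simp [h1, h2]
  · simp [h1]

-- ===== VERDICT (by name: the statement is the Claim_ definition above) =====
theorem final_spec : Claim_equal_final := by
  intro r c i _ hpre
  unfold Spec_final final final_alt
  by_cases hr0 : r ≤ 0
  · rw [if_pos hr0, buildRows]
    have h0 : (PySem.List.pyRange 0 r 1).length = 0 := by
      simp only [PySem.List.length_pyRange_one]; omega
    rw [h0]
    simp only [List.replicate_zero, List.append_nil, List.nil_append]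
    split
    · rfl
    · exact foldA_nil i
  rw [if_neg hr0, buildRows]
  have hlen : (PySem.List.pyRange 0 r 1).length = r.toNat := by
    simp [PySem.List.length_pyRange_one]
  simp only [List.nil_append]
  rw [hlen]
  set g0 : List (List Int) := List.replicate r.toNat (List.replicate c.toNat (0 : Int)) with hg0
  have hg0len : g0.length = r.toNat := by simp [hg0]
  have hg0row : ∀ x, x < g0.length → g0.getD x [] = List.replicate c.toNat (0 : Int) := by
    intro x hx
    rw [List.getD_eq_getElem _ _ hx]
    simp [hg0]
  have hfold : (if i = [] then g0 else i.foldl finalStepA g0) = i.foldl finalStepA g0 := by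
    split
    · rename_i h; rw [h]; rfl
    · rfl
  rw [hfold]
  have hv : ∀ op ∈ i, ((opParse op).2 = "r" → (opParse op).1.toNat < g0.length) ∧
      ((opParse op).2 = "c" → ∀ x < g0.length, (opParse op).1.toNat < (g0.getD x []).length) := by
    intro op hop
    have h := hpre op hop
    have h0 := opParse_nonneg op
    refine ⟨fun h2 => ?_, fun h2 x hx => ?_⟩
    · have := h.1 h2; omega
    · have hr0 : 0 < r := by omega
      have := h.2 h2 hr0
      rw [hg0row x hx]
      simp only [List.length_replicate]
      omega
  rcases gridFold i g0 hv with ⟨hl, hrl, hent⟩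
  rw [PySem.List.foldl_append_singleton_eq_map, List.nil_append]
  apply List.ext_getElem
  · rw [hl, hg0len, List.length_map, PySem.List.length_pyRange_one]
    simp
  · intro x hxA hxB
    have hxg : x < g0.length := by
      rw [hg0len]
      rw [List.length_map, PySem.List.length_pyRange_one] at hxB
      simpa using hxB
    rw [List.getElem_map, PySem.List.getElem_pyRange_one]
    apply List.ext_getElem
    · have h1 : (i.foldl finalStepA g0)[x] = (i.foldl finalStepA g0).getD x [] :=
        (List.getD_eq_getElem _ _ hxA).symm
      rw [h1, hrl x hxg, hg0row x hxg, altRow_length]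
      simp [PySem.List.length_pyRange_one]
    · intro y hyA hyB
      have hyg : y < (g0.getD x []).length := by
        have h1 : (i.foldl finalStepA g0)[x] = (i.foldl finalStepA g0).getD x [] :=
          (List.getD_eq_getElem _ _ hxA).symm
        rw [h1, hrl x hxg] at hyA
        exact hyA
      have hA : (i.foldl finalStepA g0)[x][y]
          = ((i.foldl finalStepA g0).getD x []).getD y 0 := by
        rw [List.getD_eq_getElem _ _ hxA, List.getD_eq_getElem _ _ hyA]
      rw [hA, hent x y hxg hyg]
      have hzero : (g0.getD x []).getD y 0 = 0 := by
        rw [hg0row x hxg]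
        rw [List.getD_eq_getElem _ _ (by rw [hg0row x hxg] at hyg; exact hyg)]
        simp
      rw [hzero]
      have hyB' : y < ((PySem.List.pyRange 0 c 1).map
          (fun y => (i.foldl finalStepB (PySem.Dict.empty, PySem.Dict.empty)).2.getD y 0)).length := by
        rw [altRow_length] at hyB
        exact hyB
      rw [← List.getD_eq_getElem _ _ hyB]
      rw [altRow_getD _ _ _ hyB', List.getD_eq_getElem _ _ hyB',
        List.getElem_map, PySem.List.getElem_pyRange_one]
      rcases dictFold_getD i PySem.Dict.empty PySem.Dict.empty ((0 : Int) + x) with ⟨hd1, -⟩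
      rcases dictFold_getD i PySem.Dict.empty PySem.Dict.empty ((0 : Int) + y) with ⟨-, hd2⟩
      rw [hd1, hd2]
      simp only [PySem.Dict.getD_empty, zero_add]
      rw [countP_toNat_eq i "r" x, countP_toNat_eq i "c" y]
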